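-- pv_equiv track=rewrite | github.com/mygger/python | kontrolltoo.py | liblikas
-- ===== SOURCE A (Python) =====
-- def liblikas(string):
--     '''Funktsioon võtab argumendiks lause ja tagastab stringi, kus on asendatud viimane a-ga algava sõna sõnaga
--     "liblikas"'''
--     stringlist = []
--     stringlist=string.split()
--     abilist=[]
--     for i in range(len(stringlist)):
--         aa=stringlist[i]
--         if aa[0]=="a":
--             abilist.append(i)
--     stringlist[max(abilist)]="liblikas"
--     lause=''
--     for sona in stringlist:
--         lause=lause+sona + " "
--     return lause[:-1]
-- ===== SOURCE B (Python) =====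
-- def liblikas(string):
--     '''Replace the last word starting with "a" by "liblikas"; recursive decomposition.'''
--     words = string.split()
--     new = _replace_last(words)
--     if new is None:
--         raise ValueError("no word starting with 'a'")
--     return ' '.join(new)
--
--
-- def _replace_last(words):
--     # Returns a copy of words with the LAST a-word replaced, or None if there is none.
--     if not words:
--         return None
--     rest = _replace_last(words[1:])
--     if rest is not None:
--         return [words[0]] + rest
--     if words[0].startswith('a'):
--         return ['liblikas'] + words[1:]
--     return None
-- ===== Notes on version B (the rewrite author's own statement) =====
-- stated objective: simpler
-- what changed: Instead of collecting all a-word indices in an auxiliary list, taking max() and re-joining with a manual space-accumulating loop plus a [:-1] strip, B recursively rebuilds the word list replacing the last a-word, and joins with ' '.join.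
import Mathlib
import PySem

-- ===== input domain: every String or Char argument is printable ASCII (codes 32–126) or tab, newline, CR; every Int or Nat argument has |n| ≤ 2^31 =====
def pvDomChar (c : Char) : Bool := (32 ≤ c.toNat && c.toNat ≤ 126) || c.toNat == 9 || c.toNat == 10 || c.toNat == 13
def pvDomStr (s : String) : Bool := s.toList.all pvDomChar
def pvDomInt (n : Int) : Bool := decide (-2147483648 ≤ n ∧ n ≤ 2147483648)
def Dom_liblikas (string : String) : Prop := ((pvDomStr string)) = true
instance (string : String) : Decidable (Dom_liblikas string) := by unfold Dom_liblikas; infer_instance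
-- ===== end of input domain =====

-- B replaces A's index-collecting loop + max() + manual space-joining loop with [:-1] strip by a
-- recursive rebuild of the word list (replacing the last a-word) followed by ' '.join: simpler decomposition.


-- ===== PORT A =====
def liblikas (string : String) : String :=
  let stringlist := PySem.Str.split₀ string
  let abilist : List Int :=
    (PySem.List.pyRange 0 (PySem.List.len stringlist)).foldl
      (fun abilist i =>
        let aa := PySem.List.pyGetD stringlist i ""
        if PySem.Str.pyGet? aa 0 == some 'a' then abilist ++ [i] else abilist) []
  match abilist.max? with
  | none => ""  -- Python: max([]) raises ValueError; excluded by Pre_liblikas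
  | some m =>
    -- stringlist[m] = "liblikas": m comes from range(len(stringlist)), so 0 ≤ m and .set m.toNat is exact here
    let stringlist := stringlist.set m.toNat "liblikas"
    let lause := stringlist.foldl (fun lause sona => lause ++ sona ++ " ") ""
    PySem.Str.slice lause none (some (-1))

-- ===== PORT B =====
def replaceLast : List String → Option (List String)
  | [] => none
  | w :: rest =>
    match replaceLast rest with
    | some rest' => some (w :: rest')
    | none => if PySem.Str.startswith w "a" then some ("liblikas" :: rest) else none

def liblikas_alt (string : String) : String :=
  let words := PySem.Str.split₀ string
  match replaceLast words with
  | none => ""  -- Python: raise ValueError; excluded by Pre_liblikas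
  | some new => PySem.Str.join " " new

-- ===== PRECONDITION & SPEC =====
-- A raises ValueError (max() of an empty sequence) exactly when no word of the sentence starts
-- with 'a'; B raises ValueError there too, so Pre_ excludes exactly those inputs.
def Pre_liblikas (string : String) : Prop :=
  (PySem.Str.split₀ string).any (fun w => PySem.Str.startswith w "a") = true
instance (string : String) : Decidable (Pre_liblikas string) := by unfold Pre_liblikas; infer_instance
def pvWitness_liblikas : String := "see on ananass"

def Spec_liblikas (string : String) (out : String) : Prop := out = liblikas_alt string
instance (string : String) (out : String) : Decidable (Spec_liblikas string out) := by unfold Spec_liblikas; infer_instance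

-- ===== CLAIM (what is proved, stated in full; the proofs are below) =====
def Claim_equal_liblikas : Prop := ∀ (string : String), Dom_liblikas string → Pre_liblikas string → Spec_liblikas string (liblikas string)

-- ===== LEMMAS AND PROOFS =====

-- the index of the last word starting with 'a', by the same front recursion as replaceLast
def lastIdx : List String → Option Nat
  | [] => none
  | w :: rest =>
    match lastIdx rest with
    | some k => some (k + 1)
    | none => if PySem.Str.startswith w "a" then some 0 else none

theorem cond_eq (w : String) :
    (PySem.Str.pyGet? w 0 == some 'a') = PySem.Str.startswith w "a" := by
  have h0 : PySem.Str.pyGet? w (0:Int) = w.toList[0]? := by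
    simpa using PySem.Str.pyGet?_natCast w 0
  have ha : "a".toList = ['a'] := rfl
  rw [PySem.Str.startswith_eq, h0, ha]
  cases hl : w.toList with
  | nil => simp [PySem.Chars.startswith]
  | cons c cs =>
    by_cases hc : c = 'a'
    · subst hc
      have hb : PySem.Chars.startswith ('a'::cs) ['a'] = true :=
        (PySem.Chars.startswith_iff _ _).mpr ⟨cs, rfl⟩
      simp [hb]
    · have hnp : ¬ (['a'] <+: c :: cs) := by
        rintro ⟨t, ht⟩
        have := congrArg (fun l => l[0]?) ht
        simp at this
        exact hc this.symm
      have hb : PySem.Chars.startswith (c::cs) ['a'] = false := by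
        rcases Bool.eq_false_or_eq_true (PySem.Chars.startswith (c :: cs) ['a']) with h|h
        · exact absurd ((PySem.Chars.startswith_iff _ _).mp h) hnp
        · exact h
      simp [hb, hc]

theorem replaceLast_eq (ws : List String) :
    replaceLast ws = (lastIdx ws).map (fun k => ws.set k "liblikas") := by
  induction ws with
  | nil => rfl
  | cons w rest ih =>
    simp only [replaceLast, lastIdx, ih]
    cases h : lastIdx rest with
    | some k => simp
    | none =>
      by_cases hw : PySem.Str.startswith w "a" = true
      · have hw' : PySem.Chars.startswith w.toList ['a'] = true := by simpa using hw
        simp [hw']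
      · have hw' : PySem.Chars.startswith w.toList ['a'] = false := by simpa using hw
        simp [hw']

theorem lastIdx_append (ws : List String) (w : String) :
    lastIdx (ws ++ [w]) =
      if PySem.Str.startswith w "a" then some ws.length
      else lastIdx ws := by
  induction ws with
  | nil =>
    by_cases hw : PySem.Str.startswith w "a" = true
    · have hw' : PySem.Chars.startswith w.toList ['a'] = true := by simpa using hw
      simp [lastIdx, hw']
    · have hw' : PySem.Chars.startswith w.toList ['a'] = false := by simpa using hw
      simp [lastIdx, hw']
  | cons x ws ih =>
    simp only [List.cons_append, lastIdx, ih]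
    by_cases hw : PySem.Str.startswith w "a" = true
    · have hw' : PySem.Chars.startswith w.toList ['a'] = true := by simpa using hw
      simp [hw']
    · simp only [hw, Bool.false_eq_true, if_false]

theorem lastIdx_lt (ws : List String) (k : Nat) (h : lastIdx ws = some k) : k < ws.length := by
  induction ws generalizing k with
  | nil => simp [lastIdx] at h
  | cons w rest ih =>
    simp only [lastIdx] at h
    cases hr : lastIdx rest with
    | some m =>
      rw [hr] at h
      simp only [Option.some.injEq] at h
      subst h
      exact Nat.succ_lt_succ (ih m hr)
    | none =>
      rw [hr] at h
      by_cases hw : PySem.Str.startswith w "a" = true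
      · have hw' : PySem.Chars.startswith w.toList ['a'] = true := by simpa using hw
        simp [hw'] at h
        simp [← h]
      · have hw' : PySem.Chars.startswith w.toList ['a'] = false := by simpa using hw
        simp [hw'] at h

theorem lastIdx_none_iff (ws : List String) :
    lastIdx ws = none ↔ ∀ w ∈ ws, PySem.Str.startswith w "a" = false := by
  induction ws with
  | nil => simp [lastIdx]
  | cons w rest ih =>
    simp only [lastIdx]
    cases hr : lastIdx rest with
    | some m =>
      simp only []
      constructor
      · intro h; exact absurd h (by simp)
      · intro h
        have := (ih.mpr (fun x hx => h x (by simp [hx]))).symm.trans hr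
        simp at this
    | none =>
      by_cases hw : PySem.Str.startswith w "a" = true
      · rw [if_pos hw]
        constructor
        · intro h; cases h
        · intro h
          exact absurd (h w (by simp)) (by simpa using hw)
      · have hw' : PySem.Chars.startswith w.toList ['a'] = false := by simpa using hw
        rw [if_neg hw]
        constructor
        · intro _ x hx
          rcases List.mem_cons.mp hx with h1 | h2
          · subst h1
            rw [PySem.Str.startswith_eq]
            simpa using hw'
          · exact ih.mp hr x h2
        · intro _; rfl

theorem foldl_max_le (l : List Int) (a x : Int) (ha : a ≤ x) (h : ∀ y ∈ l, y ≤ x) :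
    l.foldl max a ≤ x := by
  induction l generalizing a with
  | nil => simpa
  | cons b t ih =>
    exact ih (max a b) (by simp [ha, h b (by simp)]) (fun y hy => h y (by simp [hy]))

theorem max?_append_singleton (l : List Int) (x : Int) (h : ∀ y ∈ l, y ≤ x) :
    (l ++ [x]).max? = some x := by
  cases l with
  | nil => rfl
  | cons a t =>
    show some (List.foldl max a (t ++ [x])) = some x
    rw [List.foldl_append]
    simp only [List.foldl]
    congr 1
    exact max_eq_right (foldl_max_le t a x (h a (by simp)) (fun y hy => h y (by simp [hy])))

theorem afold_eq_filter (ws : List String) :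
    (PySem.List.pyRange 0 (PySem.List.len ws)).foldl
      (fun abilist i =>
        let aa := PySem.List.pyGetD ws i ""
        if PySem.Str.pyGet? aa 0 == some 'a' then abilist ++ [i] else abilist) []
    = (PySem.List.pyRange 0 (PySem.List.len ws)).filter
        (fun i => PySem.Str.pyGet? (PySem.List.pyGetD ws i "") 0 == some 'a') := by
  have h := PySem.List.foldl_append_if
    (fun i => PySem.Str.pyGet? (PySem.List.pyGetD ws i "") 0 == some 'a')
    (id : Int → Int) (PySem.List.pyRange 0 (PySem.List.len ws)) []
  simpa using h

theorem pyGetD_append_left (ws : List String) (w : String) (i : Int)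
    (h0 : 0 ≤ i) (h1 : i < (ws.length : Int)) :
    PySem.List.pyGetD (ws ++ [w]) i "" = PySem.List.pyGetD ws i "" := by
  obtain ⟨n, rfl⟩ := Int.eq_ofNat_of_zero_le h0
  have hn : n < ws.length := by exact_mod_cast h1
  rw [PySem.List.pyGetD_natCast, PySem.List.pyGetD_natCast]
  rw [List.getD_append _ _ _ _ hn]

theorem pyGetD_append_last (ws : List String) (w : String) :
    PySem.List.pyGetD (ws ++ [w]) (ws.length : Int) "" = w := by
  rw [PySem.List.pyGetD_natCast]
  simp [List.getD_eq_getElem?_getD]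

theorem max_filter (ws : List String) :
    ((PySem.List.pyRange 0 (PySem.List.len ws)).filter
        (fun i => PySem.Str.pyGet? (PySem.List.pyGetD ws i "") 0 == some 'a')).max?
    = (lastIdx ws).map (fun k => Int.ofNat k) := by
  induction ws using List.reverseRecOn with
  | nil => simp [lastIdx, PySem.List.len, PySem.List.pyRange_one_eq_nil le_rfl]
  | append_singleton ws w ih =>
    have hlen : PySem.List.len (ws ++ [w]) = (ws.length : Int) + 1 := by
      simp [PySem.List.len]
    have hlen2 : PySem.List.len ws = (ws.length : Int) := by simp [PySem.List.len]
    rw [hlen, PySem.List.pyRange_one_succ_right (by positivity), List.filter_append]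
    rw [hlen2] at ih
    have hfc : (PySem.List.pyRange 0 (ws.length : Int)).filter
          (fun i => PySem.Str.pyGet? (PySem.List.pyGetD (ws ++ [w]) i "") 0 == some 'a')
        = (PySem.List.pyRange 0 (ws.length : Int)).filter
          (fun i => PySem.Str.pyGet? (PySem.List.pyGetD ws i "") 0 == some 'a') := by
      apply List.filter_congr
      intro i hi
      rcases (PySem.List.mem_pyRange_one).mp hi with ⟨hi0, hi1⟩
      rw [pyGetD_append_left ws w i hi0 hi1]
    rw [hfc, lastIdx_append]
    by_cases hw : PySem.Str.startswith w "a" = true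
    · rw [if_pos hw]
      have hlast : (PySem.Str.pyGet? (PySem.List.pyGetD (ws ++ [w]) (ws.length : Int) "") 0 == some 'a') = true := by
        rw [pyGetD_append_last, cond_eq]; exact hw
      simp only [List.filter_singleton, hlast, cond_true, Option.map_some]
      rw [max?_append_singleton]
      · rfl
      intro y hy
      rcases (PySem.List.mem_pyRange_one).mp (List.mem_of_mem_filter hy) with ⟨_, hy1⟩
      omega
    · rw [if_neg hw]
      have hlast : (PySem.Str.pyGet? (PySem.List.pyGetD (ws ++ [w]) (ws.length : Int) "") 0 == some 'a') = false := by
        rw [pyGetD_append_last, cond_eq]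
        simpa using hw
      simp only [List.filter_singleton, hlast, cond_false, List.append_nil]
      exact ih

theorem foldl_join_toList (ys : List String) (acc : String) :
    (ys.foldl (fun lause sona => lause ++ sona ++ " ") acc).toList
      = acc.toList ++ ys.flatMap (fun s => s.toList ++ [' ']) := by
  induction ys generalizing acc with
  | nil => simp
  | cons y t ih =>
    rw [List.foldl_cons, ih]
    simp

theorem flatMap_dropLast (ls : List (List Char)) (h : ls ≠ []) :
    (ls.flatMap (fun l => l ++ [' '])).dropLast = PySem.Chars.join [' '] ls := by
  induction ls with
  | nil => cases h rfl
  | cons x t ih =>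
    cases t with
    | nil => simp [PySem.Chars.join_singleton]
    | cons y t2 =>
      have hne : ((y :: t2).flatMap (fun l => l ++ [' '])) ≠ [] := by simp
      rw [List.flatMap_cons, PySem.Chars.join_cons_cons, ← ih (by simp)]
      rw [List.dropLast_append_of_ne_nil hne]

theorem join_eq (ys : List String) (h : ys ≠ []) :
    PySem.Str.slice (ys.foldl (fun lause sona => lause ++ sona ++ " ") "") none (some (-1))
      = PySem.Str.join " " ys := by
  have hL : (PySem.Str.slice (ys.foldl (fun lause sona => lause ++ sona ++ " ") "") none (some (-1))).toList
      = (PySem.Str.join " " ys).toList := by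
    rw [PySem.Str.slice_to_neg_one, foldl_join_toList, PySem.Str.toList_join]
    have hmap : ys.flatMap (fun s => s.toList ++ [' '])
        = (ys.map String.toList).flatMap (fun l => l ++ [' ']) := by
      simp [List.flatMap_map]
    rw [hmap]
    have h0 : "".toList = ([] : List Char) := rfl
    rw [h0, List.nil_append]
    have hsep : " ".toList = [' '] := rfl
    rw [hsep, flatMap_dropLast _ (by simpa using h)]
  exact String.toList_inj.mp hL

-- ===== VERDICT (by name: the statement is the Claim_ definition above) =====
theorem liblikas_spec : Claim_equal_liblikas := by
  intro s _ hpre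
  unfold Spec_liblikas liblikas liblikas_alt
  dsimp only
  rw [afold_eq_filter, max_filter, replaceLast_eq]
  have hne : lastIdx (PySem.Str.split₀ s) ≠ none := by
    intro hnone
    rw [lastIdx_none_iff] at hnone
    unfold Pre_liblikas at hpre
    rw [List.any_eq_true] at hpre
    obtain ⟨w, hw, hs⟩ := hpre
    rw [hnone w hw] at hs
    cases hs
  obtain ⟨k, hk⟩ := Option.ne_none_iff_exists'.mp hne
  rw [hk]
  simp only [Option.map_some]
  have htn : (Int.ofNat k).toNat = k := Int.toNat_natCast k
  rw [htn]
  apply join_eq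
  have hlt := lastIdx_lt _ _ hk
  intro hnil
  have hlen0 : ((PySem.Str.split₀ s).set k "liblikas").length = 0 := by rw [hnil]; rfl
  rw [List.length_set] at hlen0
  omega
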